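-- pv_equiv track=rewrite | github.com/101rror/GeeksforGeeks | Difficulty: Medium/Subset XOR/subset-xor.py | subsetXOR
-- ===== SOURCE A (Python) =====
-- def subsetXOR(n : int):
--     ans = []
--     total = 0
--
--     for i in range(1, n + 1):
--         total ^= i
--
--     if total == n:
--         ans = list(range(1, n + 1))
--     else:
--         x = total ^ n
--         ans = [i for i in range(1, n + 1) if i != x]
--
--     return ans
-- ===== SOURCE B (Python) =====
-- def subsetXOR(n: int):
--     # No XOR accumulation at all: pick the element to drop directly from n % 4
--     # and build the answer as the concatenation of two ranges around it.
--     if n < 1: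
--         return []
--     r = n % 4
--     if r == 0 or n == 1:
--         return list(range(1, n + 1))
--     if r == 1:
--         x = n - 1
--     elif r == 2:
--         x = 1
--     else:
--         x = n
--     return list(range(1, x)) + list(range(x + 1, n + 1))
-- ===== Notes on version B (the rewrite author's own statement) =====
-- stated objective: alternative
-- what changed: B computes no XOR at all: it determines the dropped element directly by case analysis on n mod 4 and builds the answer as the concatenation of two ranges around it, instead of A's XOR-accumulation scan followed by a filtering comprehension.
import Mathlib
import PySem

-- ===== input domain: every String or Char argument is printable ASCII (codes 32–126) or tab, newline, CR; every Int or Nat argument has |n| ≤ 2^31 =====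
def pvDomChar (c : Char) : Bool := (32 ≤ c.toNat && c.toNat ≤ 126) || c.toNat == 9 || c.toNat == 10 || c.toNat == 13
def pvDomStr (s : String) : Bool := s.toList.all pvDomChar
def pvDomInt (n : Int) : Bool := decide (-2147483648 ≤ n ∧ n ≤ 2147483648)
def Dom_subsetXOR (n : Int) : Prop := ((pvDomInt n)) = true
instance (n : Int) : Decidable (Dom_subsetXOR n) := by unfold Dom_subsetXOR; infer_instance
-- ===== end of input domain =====

-- B computes no XOR at all: it determines the dropped element directly by case analysis on
-- n mod 4 and builds the answer as two concatenated ranges (alternative decomposition).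

-- ===== PORT A =====
def subsetXOR (n : Int) : List Int :=
  let total : Int := (PySem.List.pyRange 1 (n + 1) 1).foldl (fun t i => PySem.Int.bxor t i) 0
  if total = n then
    PySem.List.pyRange 1 (n + 1) 1
  else
    let x := PySem.Int.bxor total n
    (PySem.List.pyRange 1 (n + 1) 1).filter (fun i => i != x)

-- ===== PORT B =====
def subsetXOR_alt (n : Int) : List Int :=
  if n < 1 then []
  else
    let r := PySem.Int.mod n 4
    if r = 0 ∨ n = 1 then
      PySem.List.pyRange 1 (n + 1) 1
    else
      let x : Int := if r = 1 then n - 1 else if r = 2 then 1 else n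
      PySem.List.pyRange 1 x 1 ++ PySem.List.pyRange (x + 1) (n + 1) 1

-- ===== PRECONDITION & SPEC =====
def Spec_subsetXOR (n : Int) (out : List Int) : Prop := out = subsetXOR_alt n
instance (n : Int) (out : List Int) : Decidable (Spec_subsetXOR n out) := by unfold Spec_subsetXOR; infer_instance

-- ===== CLAIM (what is proved, stated in full; the proofs are below) =====
def Claim_equal_subsetXOR : Prop := ∀ (n : Int), Dom_subsetXOR n → Spec_subsetXOR n (subsetXOR n)

-- ===== LEMMAS AND PROOFS =====

-- A's fold over range(1, k+1) equals Mathlib's fold over range(0..k) (the extra 0 XORs in nothing).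
theorem fold_bxor_eq_natFold (k : Nat) :
    (PySem.List.pyRange 1 ((k : Int) + 1) 1).foldl (fun t i => PySem.Int.bxor t i) 0
      = (((List.range (k + 1)).foldl (· ^^^ ·) 0 : Nat) : Int) := by
  induction k with
  | zero => simp [PySem.List.pyRange_one_eq_nil, List.range_succ]
  | succ k ih =>
    have h1 : (1 : Int) ≤ (k : Int) + 1 := by omega
    have h2 : (((k + 1 : Nat) : Int)) + 1 = ((k : Int) + 1) + 1 := by push_cast; ring
    rw [h2, PySem.List.pyRange_one_succ_right h1, List.foldl_append, ih,
        show List.range (k + 1 + 1) = List.range (k + 1) ++ [k + 1] from List.range_succ,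
        List.foldl_append]
    simp only [List.foldl_cons, List.foldl_nil]
    rw [show ((k : Int) + 1) = (((k + 1 : Nat) : Int)) by push_cast; ring,
        PySem.Int.bxor_natCast]

-- A's accumulated total equals the closed form based on n % 4.
theorem total_eq (n : Int) :
    (PySem.List.pyRange 1 (n + 1) 1).foldl (fun t i => PySem.Int.bxor t i) 0
      = (if n < 1 then 0
         else if PySem.Int.mod n 4 = 0 then n
         else if PySem.Int.mod n 4 = 1 then 1
         else if PySem.Int.mod n 4 = 2 then n + 1
         else 0) := by
  by_cases hn : n < 1
  · rw [PySem.List.pyRange_one_eq_nil (by omega)]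
    simp [hn]
  · push Not at hn
    obtain ⟨k, rfl⟩ : ∃ k : Nat, n = (k : Int) := ⟨n.toNat, (Int.toNat_of_nonneg (by omega)).symm⟩
    rw [fold_bxor_eq_natFold, Nat.xor_range]
    have hmod : PySem.Int.mod (k : Int) 4 = ((k % 4 : Nat) : Int) := by
      exact_mod_cast PySem.Int.mod_natCast k 4
    have hfin : ((Fin.ofNat 4 k : Fin 4) : Nat) = k % 4 := Fin.val_ofNat ..
    have hk4 : k % 4 = 0 ∨ k % 4 = 1 ∨ k % 4 = 2 ∨ k % 4 = 3 := by omega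
    rcases hk4 with h | h | h | h <;>
      · have hfe : (Fin.ofNat 4 k : Fin 4) = ⟨k % 4, by omega⟩ := Fin.ext (by rw [hfin])
        rw [hfe]
        simp only [h]
        have hn1 : ¬((k : Int) < 1) := by omega
        rw [hmod, h]
        simp [hn1]

-- Removing one in-range element by filtering equals splitting the range around it.
theorem filter_range_eq_split (n x : Int) (h1 : 1 ≤ x) (h2 : x ≤ n) :
    (PySem.List.pyRange 1 (n + 1) 1).filter (fun i => i != x)
      = PySem.List.pyRange 1 x 1 ++ PySem.List.pyRange (x + 1) (n + 1) 1 := by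
  rw [PySem.List.pyRange_one_append 1 x (n + 1) h1 (by omega),
      PySem.List.pyRange_one_cons (show x < n + 1 by omega), List.filter_append]
  have hl : (PySem.List.pyRange 1 x 1).filter (fun i => i != x) = PySem.List.pyRange 1 x 1 := by
    apply List.filter_eq_self.mpr
    intro a ha
    have := (PySem.List.mem_pyRange_one).mp ha
    simp only [bne_iff_ne, ne_eq]
    omega
  have hr : (PySem.List.pyRange (x + 1) (n + 1) 1).filter (fun i => i != x)
      = PySem.List.pyRange (x + 1) (n + 1) 1 := by
    apply List.filter_eq_self.mpr
    intro a ha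
    have := (PySem.List.mem_pyRange_one).mp ha
    simp only [bne_iff_ne, ne_eq]
    omega
  rw [hl]
  simp only [List.filter_cons]
  simp [hr]

-- 1 ^^^ n = n - 1 for odd positive n (over Int, via Nat).
theorem bxor_one_odd (k : Nat) (h : k % 2 = 1) :
    PySem.Int.bxor 1 (k : Int) = (k : Int) - 1 := by
  have h1 : PySem.Int.bxor 1 (k : Int) = ((1 ^^^ k : Nat) : Int) := by
    exact_mod_cast PySem.Int.bxor_natCast 1 k
  rw [h1, Nat.xor_comm, Nat.xor_one_of_odd (Nat.odd_iff.mpr h)]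
  omega

-- (n+1) ^^^ n = 1 for even nonneg n (over Int, via Nat).
theorem bxor_succ_even (k : Nat) (h : k % 2 = 0) :
    PySem.Int.bxor ((k : Int) + 1) (k : Int) = 1 := by
  have h1 : ((k : Int) + 1) = ((k + 1 : Nat) : Int) := by push_cast; ring
  rw [h1, show PySem.Int.bxor ((k + 1 : Nat) : Int) (k : Int) = (((k + 1) ^^^ k : Nat) : Int) from
        by exact_mod_cast PySem.Int.bxor_natCast (k + 1) k]
  have h2 : k + 1 = k ^^^ 1 := (Nat.xor_one_of_even (Nat.even_iff.mpr h)).symm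
  rw [h2, Nat.xor_comm (k ^^^ 1) k, Nat.xor_xor_cancel_left]
  norm_num

-- 0 ^^^ n = n.
theorem bxor_zero (n : Int) : PySem.Int.bxor 0 n = n := by
  simp only [PySem.Int.bxor, Int.toNat_zero, Nat.zero_xor]
  split_ifs <;> omega

-- ===== VERDICT (by name: the statement is the Claim_ definition above) =====
theorem subsetXOR_spec : Claim_equal_subsetXOR := by
  intro n _
  unfold Spec_subsetXOR subsetXOR subsetXOR_alt
  rw [total_eq]
  by_cases hn : n < 1
  · -- empty / negative range: both sides are []
    simp only [hn, if_pos]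
    have hnil : PySem.List.pyRange 1 (n + 1) 1 = [] :=
      PySem.List.pyRange_one_eq_nil (by omega)
    by_cases h0 : (0 : Int) = n
    · simp [← h0]
    · simp [h0, hnil]
  · obtain ⟨k, rfl⟩ : ∃ k : Nat, n = (k : Int) := ⟨n.toNat, (Int.toNat_of_nonneg (by omega)).symm⟩
    have hk1 : 1 ≤ k := by omega
    have hmod : PySem.Int.mod (k : Int) 4 = ((k % 4 : Nat) : Int) := by
      exact_mod_cast PySem.Int.mod_natCast k 4
    have hk4 : k % 4 = 0 ∨ k % 4 = 1 ∨ k % 4 = 2 ∨ k % 4 = 3 := by omega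
    simp only [hn, hmod]
    rcases hk4 with h | h | h | h
    · -- r = 0: total = n, both return the full range
      rw [h]
      norm_num
    · -- r = 1: total = 1; n = 1 gives the full range, otherwise drop n - 1
      rw [h]
      norm_num
      by_cases hone : k = 1
      · subst hone; norm_num
      · rw [if_neg hone, bxor_one_odd k (by omega),
            if_neg (show ¬ (1 : Int) = (k : Int) by omega)]
        have := filter_range_eq_split (k : Int) ((k : Int) - 1) (by omega) (by omega)
        rw [show ((k : Int) - 1) + 1 = (k : Int) by ring,
            PySem.List.pyRange_one_singleton] at this
        exact this
    · -- r = 2: total = n + 1, drop 1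
      rw [h]
      norm_num
      rw [if_neg (show ¬ k = 1 by omega), bxor_succ_even k (by omega)]
      have := filter_range_eq_split (k : Int) 1 (by omega) (by omega)
      rw [show (1 : Int) + 1 = 2 by ring, PySem.List.pyRange_one_eq_nil (le_refl 1)] at this
      simpa using this
    · -- r = 3: total = 0, drop n
      rw [h]
      norm_num
      rw [if_neg (show ¬ k = 1 by omega), bxor_zero,
          if_neg (show ¬ (0 : Int) = (k : Int) by omega)]
      have := filter_range_eq_split (k : Int) (k : Int) (by omega) (by omega)
      rw [PySem.List.pyRange_one_eq_nil (show (k : Int) + 1 ≤ (k : Int) + 1 from le_refl _)] at this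
      simpa using this
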